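-- pv_equiv track=rewrite | github.com/gridcase1590/Sha256-speedrun | Shatterer_v5.py | autofocus_bytes
-- ===== SOURCE A (Python) =====
-- def autofocus_bytes(bl):
--     bo=0;bs=0;bc=[]
--     for off in range(-128,129):
--         ch=[];sc=0
--         for b in bl:
--             c=(int(b)+off)&0xFF
--             if 97<=c<=122:ch.append(chr(c));sc+=2
--             elif 65<=c<=90:ch.append(chr(c));sc+=1
--         if sc>bs:bs=sc;bo=off;bc=ch
--     seen=set()
--     return [c for c in bc if not(c.lower() in seen or seen.add(c.lower()))],bo
-- ===== SOURCE B (Python) =====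
-- def autofocus_bytes(bl):
--     # Histogram the byte values once, then score each offset over the 256
--     # buckets instead of rescanning the whole input 257 times; rebuild the
--     # winning character list (deduplicated case-insensitively) in one final pass.
--     cnt = {}
--     for b in bl:
--         k = int(b) % 256
--         cnt[k] = cnt.get(k, 0) + 1
--     bo = 0
--     bs = 0
--     for off in range(-128, 129):
--         sc = 0
--         for v in range(256):
--             n = cnt.get(v, 0)
--             c = (v + off) % 256
--             if 97 <= c <= 122:
--                 sc += 2 * n
--             elif 65 <= c <= 90:
--                 sc += n
--         if sc > bs:
--             bs = sc
--             bo = off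
--     if bs == 0:
--         return [], 0
--     out = []
--     seen = set()
--     for b in bl:
--         c = (int(b) + bo) % 256
--         if 97 <= c <= 122 or 65 <= c <= 90:
--             ch = chr(c)
--             k = ch.lower()
--             if k not in seen:
--                 seen.add(k)
--                 out.append(ch)
--     return out, bo
-- ===== Notes on version B (the rewrite author's own statement) =====
-- stated objective: faster
-- what changed: B builds a 256-bucket histogram of the byte values in one pass and scores each of the 257 offsets over the buckets (then one reconstruction pass), instead of A's full rescan of the input for every offset.
import Mathlib
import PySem

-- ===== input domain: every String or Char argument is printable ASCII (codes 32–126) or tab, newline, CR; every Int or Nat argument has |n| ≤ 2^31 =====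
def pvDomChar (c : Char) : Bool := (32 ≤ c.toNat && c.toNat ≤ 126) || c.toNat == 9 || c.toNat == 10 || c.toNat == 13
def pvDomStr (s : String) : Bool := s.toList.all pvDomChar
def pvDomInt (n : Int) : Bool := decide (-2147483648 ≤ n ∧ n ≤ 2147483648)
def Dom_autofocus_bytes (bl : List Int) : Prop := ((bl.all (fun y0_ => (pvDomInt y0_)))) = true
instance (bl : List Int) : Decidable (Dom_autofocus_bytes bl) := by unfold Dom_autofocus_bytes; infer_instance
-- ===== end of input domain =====

-- B replaces A's 257 full rescans of the input by a 256-bucket byte histogram built once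
-- (scores per offset are read off the buckets) plus one reconstruction pass; objective: faster.

-- ===== PORT A =====
-- 'x & 0xFF' is PySem.Int.band x 255 (Python-exact); chr(c) for 65 ≤ c ≤ 122 is the
-- one-character string String.mk [Char.ofNat c.toNat] (exact on that range).
def autofocus_bytes (bl : List Int) : List String × Int :=
  -- for off in range(-128,129): inner scan of bl building (ch, sc); keep if sc > bs
  let st := (PySem.List.pyRange (-128) 129 1).foldl
    (fun (s : Int × Int × List String) off =>
      let t := bl.foldl
        (fun (t : List String × Int) b =>
          let c := PySem.Int.band (b + off) 255
          if 97 ≤ c ∧ c ≤ 122 then (t.1 ++ [String.mk [Char.ofNat c.toNat]], t.2 + 2)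
          else if 65 ≤ c ∧ c ≤ 90 then (t.1 ++ [String.mk [Char.ofNat c.toNat]], t.2 + 1)
          else t) ([], 0)
      if t.2 > s.2.1 then (off, t.2, t.1) else s) (0, 0, [])
  -- [c for c in bc if not (c.lower() in seen or seen.add(c.lower()))]
  let ded := st.2.2.foldl
    (fun (p : PySem.Set String × List String) c =>
      if PySem.Set.contains p.1 (PySem.Str.lower c) then p
      else (PySem.Set.add p.1 (PySem.Str.lower c), p.2 ++ [c]))
    (PySem.Set.empty, [])
  (ded.2, st.1)

-- ===== PORT B =====
-- 'x % 256' is PySem.Int.mod x 256 (Python-exact).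
def autofocus_bytes_alt (bl : List Int) : List String × Int :=
  -- cnt[b % 256] += 1  (histogram built once)
  let cnt := bl.foldl
    (fun (d : PySem.Dict Int Int) b =>
      d.insert (PySem.Int.mod b 256) (d.getD (PySem.Int.mod b 256) 0 + 1))
    PySem.Dict.empty
  -- score each offset over the 256 buckets, keep the first strict improvement
  let sel := (PySem.List.pyRange (-128) 129 1).foldl
    (fun (s : Int × Int) off =>
      let sc := (PySem.List.pyRange 0 256 1).foldl
        (fun (sc : Int) v =>
          let n := cnt.getD v 0
          let c := PySem.Int.mod (v + off) 256
          if 97 ≤ c ∧ c ≤ 122 then sc + 2 * n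
          else if 65 ≤ c ∧ c ≤ 90 then sc + n
          else sc) 0
      if sc > s.2 then (off, sc) else s) (0, 0)
  if sel.2 = 0 then ([], 0)
  else
    -- one pass: rebuild the winning letters, deduplicated case-insensitively
    let r := bl.foldl
      (fun (p : PySem.Set String × List String) b =>
        let c := PySem.Int.mod (b + sel.1) 256
        if (97 ≤ c ∧ c ≤ 122) ∨ (65 ≤ c ∧ c ≤ 90) then
          let ch := String.mk [Char.ofNat c.toNat]
          if PySem.Set.contains p.1 (PySem.Str.lower ch) then p
          else (PySem.Set.add p.1 (PySem.Str.lower ch), p.2 ++ [ch])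
        else p)
      (PySem.Set.empty, [])
    (r.2, sel.1)

-- ===== PRECONDITION & SPEC =====
def Spec_autofocus_bytes (bl : List Int) (out : List String × Int) : Prop := out = autofocus_bytes_alt bl
instance (bl : List Int) (out : List String × Int) : Decidable (Spec_autofocus_bytes bl out) := by unfold Spec_autofocus_bytes; infer_instance

-- ===== CLAIM (what is proved, stated in full; the proofs are below) =====
def Claim_equal_autofocus_bytes : Prop := ∀ (bl : List Int), Dom_autofocus_bytes bl → Spec_autofocus_bytes bl (autofocus_bytes bl)

-- ===== LEMMAS AND PROOFS =====

theorem natband (x : Nat) : x &&& 255 = x % 256 := by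
  apply Nat.eq_of_testBit_eq
  intro i
  rw [show (256:Nat) = 2^8 by norm_num, Nat.testBit_mod_two_pow, Nat.testBit_and,
      show (255:Nat) = 2^8-1 by norm_num, Nat.testBit_two_pow_sub_one]
  by_cases h : i < 8 <;> simp [h]

theorem band255 (a : Int) : PySem.Int.band a 255 = PySem.Int.mod a 256 := by
  simp only [PySem.Int.band, PySem.Int.mod]
  norm_num
  rw [show Int.toNat 255 = 255 from rfl, Int.fmod_eq_emod]
  norm_num
  split
  · rw [natband]; omega
  · rw [Nat.and_comm, natband]; omega

theorem pymod256 (a : Int) : PySem.Int.mod a 256 = a % 256 := by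
  simp only [PySem.Int.mod]
  rw [Int.fmod_eq_emod]
  norm_num

-- the mathematical layer shared by both proofs
def wgt (c : Int) : Int := if 97 ≤ c ∧ c ≤ 122 then 2 else if 65 ≤ c ∧ c ≤ 90 then 1 else 0
def cByte (b off : Int) : Int := (b + off) % 256
def isL (c : Int) : Bool := decide ((97 ≤ c ∧ c ≤ 122) ∨ (65 ≤ c ∧ c ≤ 90))
def chrS (c : Int) : String := String.mk [Char.ofNat c.toNat]
def scOf (bl : List Int) (off : Int) : Int := (bl.map (fun b => wgt (cByte b off))).sum
def chOf (bl : List Int) (off : Int) : List String :=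
  (bl.filter (fun b => isL (cByte b off))).map (fun b => chrS (cByte b off))

theorem cByte_mod (b off : Int) : cByte (b % 256) off = cByte b off := by
  simp only [cByte]; omega

-- A's inner scan computes (chOf, scOf)
theorem innerA (bl : List Int) (off : Int) (acc : List String × Int) :
    bl.foldl
      (fun (t : List String × Int) b =>
        let c := PySem.Int.band (b + off) 255
        if 97 ≤ c ∧ c ≤ 122 then (t.1 ++ [String.mk [Char.ofNat c.toNat]], t.2 + 2)
        else if 65 ≤ c ∧ c ≤ 90 then (t.1 ++ [String.mk [Char.ofNat c.toNat]], t.2 + 1)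
        else t) acc
    = (acc.1 ++ chOf bl off, acc.2 + scOf bl off) := by
  obtain ⟨a1, a2⟩ := acc
  have hbody : (fun (t : List String × Int) b =>
        let c := PySem.Int.band (b + off) 255
        if 97 ≤ c ∧ c ≤ 122 then (t.1 ++ [String.mk [Char.ofNat c.toNat]], t.2 + 2)
        else if 65 ≤ c ∧ c ≤ 90 then (t.1 ++ [String.mk [Char.ofNat c.toNat]], t.2 + 1)
        else t)
      = (fun (t : List String × Int) b =>
        (if isL (cByte b off) then t.1 ++ [chrS (cByte b off)] else t.1,
         t.2 + wgt (cByte b off))) := by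
    funext t b
    simp only [band255, pymod256, cByte, isL, chrS, wgt, decide_eq_true_eq]
    split_ifs <;> first | rfl | (exfalso; omega) | simp
  rw [hbody,
      PySem.List.foldl_prod_mk
        (f := fun (l : List String) (b : Int) => if isL (cByte b off) then l ++ [chrS (cByte b off)] else l)
        (g := fun (s : Int) (b : Int) => s + wgt (cByte b off)),
      PySem.List.foldl_append_if, PySem.List.foldl_add]
  simp [chOf, scOf]

theorem sum_single (k : Int) (f : Int → Int) :
    ∀ (l : List Int), l.Nodup → k ∈ l →
    (l.map (fun v => (if v = k then 1 else 0) * f v)).sum = f k := by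
  intro l
  induction l with
  | nil => simp
  | cons x l ih =>
    intro hnd hk
    have hnd' := List.nodup_cons.mp hnd
    simp only [List.map_cons, List.sum_cons]
    by_cases hx : x = k
    · subst hx
      have hz : (l.map (fun v => (if v = x then 1 else 0) * f v)).sum = 0 := by
        apply List.sum_eq_zero
        intro y hy
        obtain ⟨v, hv, rfl⟩ := List.mem_map.mp hy
        have hvx : ¬ v = x := fun h => hnd'.1 (h ▸ hv)
        simp [hvx]
      rw [hz]
      simp
    · rcases List.mem_cons.mp hk with rfl | hk'
      · exact absurd rfl hx
      · rw [ih hnd'.2 hk']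
        simp [hx]

-- sum-by-fibers: the histogram score equals the direct score
theorem histsum (off : Int) : ∀ (bl : List Int),
    ((PySem.List.pyRange 0 256 1).map
      (fun v => ((bl.map (fun b => b % 256)).count v : Int) * wgt (cByte v off))).sum
    = scOf bl off := by
  intro bl
  induction bl with
  | nil =>
    have h0 : ((PySem.List.pyRange 0 256 1).map
        (fun v => (((List.map (fun b => b % 256) ([] : List Int)).count v : Int)) * wgt (cByte v off))).sum = 0 := by
      apply List.sum_eq_zero
      intro y hy
      obtain ⟨v, _, rfl⟩ := List.mem_map.mp hy
      simp
    rw [h0]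
    simp [scOf]
  | cons b bl ih =>
    have hcnt : ∀ v : Int,
        (((b :: bl).map (fun b => b % 256)).count v : Int)
        = (if v = b % 256 then 1 else 0)
          + ((bl.map (fun b => b % 256)).count v : Int) := by
      intro v
      simp only [List.map_cons, List.count_cons]
      by_cases h : v = b % 256
      · simp [h]
        ring
      · have h' : ¬ (b % 256 = v) := fun hh => h hh.symm
        simp [h, h']
    have step1 :
        (((PySem.List.pyRange 0 256 1)).map
          (fun v => (((b :: bl).map (fun b => b % 256)).count v : Int) * wgt (cByte v off))).sum
        = ((PySem.List.pyRange 0 256 1).map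
          (fun v => (if v = b % 256 then 1 else 0) * wgt (cByte v off)
            + ((bl.map (fun b => b % 256)).count v : Int) * wgt (cByte v off))).sum := by
      apply congrArg
      apply List.map_congr_left
      intro v _
      rw [hcnt v]; ring
    have hmem : b % 256 ∈ PySem.List.pyRange 0 256 1 := by
      rw [PySem.List.mem_pyRange_one]
      constructor <;> omega
    rw [step1, PySem.List.sum_map_add_int, ih,
        sum_single (b % 256) (fun v => wgt (cByte v off)) _
          (PySem.List.nodup_pyRange_one 0 256) hmem,
        cByte_mod]
    simp [scOf]

-- B's bucket scan computes scOf
theorem innerB (bl : List Int) (off : Int) :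
    (PySem.List.pyRange 0 256 1).foldl
      (fun (sc : Int) v =>
        let n := (bl.foldl
          (fun (d : PySem.Dict Int Int) b =>
            d.insert (PySem.Int.mod b 256) (d.getD (PySem.Int.mod b 256) 0 + 1))
          PySem.Dict.empty).getD v 0
        let c := PySem.Int.mod (v + off) 256
        if 97 ≤ c ∧ c ≤ 122 then sc + 2 * n
        else if 65 ≤ c ∧ c ≤ 90 then sc + n
        else sc) 0
    = scOf bl off := by
  have hcnt : bl.foldl
      (fun (d : PySem.Dict Int Int) b =>
        d.insert (PySem.Int.mod b 256) (d.getD (PySem.Int.mod b 256) 0 + 1))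
      PySem.Dict.empty
      = PySem.Dict.counter (bl.map (fun b => PySem.Int.mod b 256)) := by
    rw [← PySem.Dict.foldl_insert_getD_add_one_eq_counter, List.foldl_map]
  rw [hcnt]
  have hbody : (fun (sc : Int) v =>
        let n := (PySem.Dict.counter (bl.map (fun b => PySem.Int.mod b 256))).getD v 0
        let c := PySem.Int.mod (v + off) 256
        if 97 ≤ c ∧ c ≤ 122 then sc + 2 * n
        else if 65 ≤ c ∧ c ≤ 90 then sc + n
        else sc)
      = (fun (sc : Int) v =>
        sc + ((bl.map (fun b => b % 256)).count v : Int) * wgt (cByte v off)) := by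
    funext sc v
    rw [show ((PySem.Dict.counter (bl.map (fun b => PySem.Int.mod b 256))).getD v 0)
        = (((bl.map (fun b => PySem.Int.mod b 256)).count v : Int)) from PySem.Dict.getD_counter _ _]
    simp only [pymod256, cByte, wgt]
    split_ifs <;> ring
  rw [hbody, PySem.List.foldl_add]
  simpa using histsum off bl

-- projecting A's triple selection fold onto its first two components gives B's pair fold
theorem sel_proj (bl : List Int) : ∀ (offs : List Int) (bo bs : Int) (bc : List String),
    ((offs.foldl (fun (s : Int × Int × List String) off =>
        if scOf bl off > s.2.1 then (off, scOf bl off, chOf bl off) else s) (bo, bs, bc)).1,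
     (offs.foldl (fun (s : Int × Int × List String) off =>
        if scOf bl off > s.2.1 then (off, scOf bl off, chOf bl off) else s) (bo, bs, bc)).2.1)
    = offs.foldl (fun (s : Int × Int) off =>
        if scOf bl off > s.2 then (off, scOf bl off) else s) (bo, bs) := by
  intro offs
  induction offs with
  | nil => intro bo bs bc; rfl
  | cons o offs ih =>
    intro bo bs bc
    simp only [List.foldl_cons]
    by_cases h : bs < scOf bl o
    · simpa [h] using ih o (scOf bl o) (chOf bl o)
    · simpa [h] using ih bo bs bc

-- invariant for the third component of A's selection fold
theorem sel_third (bl : List Int) : ∀ (offs : List Int) (s : Int × Int × List String),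
    0 ≤ s.2.1 → (s.2.1 = 0 → s = (0, 0, ([] : List String))) → (s.2.1 ≠ 0 → s.2.2 = chOf bl s.1) →
    (let r := offs.foldl (fun (s : Int × Int × List String) off =>
        if scOf bl off > s.2.1 then (off, scOf bl off, chOf bl off) else s) s
     0 ≤ r.2.1 ∧ (r.2.1 = 0 → r = (0, 0, ([] : List String))) ∧ (r.2.1 ≠ 0 → r.2.2 = chOf bl r.1)) := by
  intro offs
  induction offs with
  | nil => intro s h1 h2 h3; exact ⟨h1, h2, h3⟩
  | cons o offs ih =>
    intro s h1 h2 h3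
    simp only [List.foldl_cons]
    by_cases h : scOf bl o > s.2.1
    · rw [if_pos h]
      exact ih (o, scOf bl o, chOf bl o) (le_of_lt (lt_of_le_of_lt h1 h))
        (fun hz => absurd hz (by have := lt_of_le_of_lt h1 h; simp; omega))
        (fun _ => rfl)
    · rw [if_neg h]
      exact ih s h1 h2 h3

-- B's fused rebuild pass equals A's dedup pass run on chOf
theorem rebuild (off : Int) (bl : List Int) (p : PySem.Set String × List String) :
    bl.foldl
      (fun (p : PySem.Set String × List String) b =>
        let c := PySem.Int.mod (b + off) 256
        if (97 ≤ c ∧ c ≤ 122) ∨ (65 ≤ c ∧ c ≤ 90) then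
          let ch := String.mk [Char.ofNat c.toNat]
          if PySem.Set.contains p.1 (PySem.Str.lower ch) then p
          else (PySem.Set.add p.1 (PySem.Str.lower ch), p.2 ++ [ch])
        else p) p
    = (chOf bl off).foldl
      (fun (p : PySem.Set String × List String) c =>
        if PySem.Set.contains p.1 (PySem.Str.lower c) then p
        else (PySem.Set.add p.1 (PySem.Str.lower c), p.2 ++ [c])) p := by
  have hbody : (fun (p : PySem.Set String × List String) b =>
        let c := PySem.Int.mod (b + off) 256
        if (97 ≤ c ∧ c ≤ 122) ∨ (65 ≤ c ∧ c ≤ 90) then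
          let ch := String.mk [Char.ofNat c.toNat]
          if PySem.Set.contains p.1 (PySem.Str.lower ch) then p
          else (PySem.Set.add p.1 (PySem.Str.lower ch), p.2 ++ [ch])
        else p)
      = (fun (p : PySem.Set String × List String) b =>
        if isL (cByte b off) then
          (if PySem.Set.contains p.1 (PySem.Str.lower (chrS (cByte b off))) then p
           else (PySem.Set.add p.1 (PySem.Str.lower (chrS (cByte b off))), p.2 ++ [chrS (cByte b off)]))
        else p) := by
    funext p b
    simp only [pymod256, cByte, isL, chrS, decide_eq_true_eq]
  rw [hbody, PySem.List.foldl_if_eq_foldl_filter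
        (p := fun b => isL (cByte b off))
        (f := fun (p : PySem.Set String × List String) (b : Int) =>
          if PySem.Set.contains p.1 (PySem.Str.lower (chrS (cByte b off))) then p
          else (PySem.Set.add p.1 (PySem.Str.lower (chrS (cByte b off))), p.2 ++ [chrS (cByte b off)]))]
  simp only [chOf]
  rw [List.foldl_map]

-- ===== VERDICT (by name: the statement is the Claim_ definition above) =====
theorem autofocus_bytes_spec : Claim_equal_autofocus_bytes := by
  intro bl _
  unfold Spec_autofocus_bytes autofocus_bytes autofocus_bytes_alt
  -- rewrite A's outer body via innerA, B's via innerB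
  have hA : (fun (s : Int × Int × List String) off =>
      let t := bl.foldl
        (fun (t : List String × Int) b =>
          let c := PySem.Int.band (b + off) 255
          if 97 ≤ c ∧ c ≤ 122 then (t.1 ++ [String.mk [Char.ofNat c.toNat]], t.2 + 2)
          else if 65 ≤ c ∧ c ≤ 90 then (t.1 ++ [String.mk [Char.ofNat c.toNat]], t.2 + 1)
          else t) ([], 0)
      if t.2 > s.2.1 then (off, t.2, t.1) else s)
      = (fun (s : Int × Int × List String) off =>
          if scOf bl off > s.2.1 then (off, scOf bl off, chOf bl off) else s) := by
    funext s off
    rw [innerA bl off ([], 0)]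
    simp
  have hB : (fun (s : Int × Int) off =>
      let sc := (PySem.List.pyRange 0 256 1).foldl
        (fun (sc : Int) v =>
          let n := (bl.foldl
            (fun (d : PySem.Dict Int Int) b =>
              d.insert (PySem.Int.mod b 256) (d.getD (PySem.Int.mod b 256) 0 + 1))
            PySem.Dict.empty).getD v 0
          let c := PySem.Int.mod (v + off) 256
          if 97 ≤ c ∧ c ≤ 122 then sc + 2 * n
          else if 65 ≤ c ∧ c ≤ 90 then sc + n
          else sc) 0
      if sc > s.2 then (off, sc) else s)
      = (fun (s : Int × Int) off =>
          if scOf bl off > s.2 then (off, scOf bl off) else s) := by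
    funext s off
    rw [innerB bl off]
  simp only [hA, hB]
  set r3 := (PySem.List.pyRange (-128) 129 1).foldl
      (fun (s : Int × Int × List String) off =>
        if scOf bl off > s.2.1 then (off, scOf bl off, chOf bl off) else s) (0, 0, []) with hr3
  set r2 := (PySem.List.pyRange (-128) 129 1).foldl
      (fun (s : Int × Int) off =>
        if scOf bl off > s.2 then (off, scOf bl off) else s) (0, 0) with hr2
  have hproj : (r3.1, r3.2.1) = r2 := by
    rw [hr3, hr2]; exact sel_proj bl _ 0 0 []
  have hinv := sel_third bl (PySem.List.pyRange (-128) 129 1) (0, 0, [])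
      (le_refl 0) (fun _ => rfl) (fun h => absurd rfl h)
  rw [← hr3] at hinv
  obtain ⟨hnn, hzero, hch⟩ := hinv
  by_cases hz : r2.2 = 0
  · rw [if_pos hz]
    have : r3 = (0, 0, []) := hzero (by rw [← hproj] at hz; simpa using hz)
    rw [this]
    simp
  · rw [if_neg hz]
    have h31 : r3.1 = r2.1 := by rw [← hproj]
    have h32 : r3.2.1 ≠ 0 := by
      rw [← hproj] at hz; simpa using hz
    have hbc : r3.2.2 = chOf bl r3.1 := hch h32
    rw [rebuild r2.1 bl, hbc, h31]

-- end of file
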